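-- pv_equiv track=rewrite | github.com/PrudyvusP/algorithms_collection | 4_sorts/big_number.py | is_first_card_weaker
-- ===== SOURCE A (Python) =====
-- def is_first_card_weaker(a, b):
--     a_len = len(a)
--     b_len = len(b)
--     if a_len == b_len:
--         len_f = a_len
--     else:
--         len_f = a_len + b_len
--
--     for i in range(0, len_f):
--         if i < a_len:
--             char_ac = a[i]
--         else:
--             char_ac = b[i - a_len]
--         if i < b_len:
--             char_bc = b[i]
--         else:
--             char_bc = a[i - b_len]
--         if char_bc == char_ac:
--             continue
--         if char_ac < char_bc:
--             return False
--         return True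
-- ===== SOURCE B (Python) =====
-- def is_first_card_weaker(a, b):
--     # Euclid-style reduction: a+b vs b+a compares like comparing the first
--     # mismatch in the overlap; when one string is a prefix of the other,
--     # strip that prefix and recurse on the remainder (gcd-like descent).
--     if not a or not b:
--         return None
--     for x, y in zip(a, b):
--         if x != y:
--             return x > y
--     if len(a) == len(b):
--         return None
--     if len(a) < len(b):
--         return is_first_card_weaker(a, b[len(a):])
--     return is_first_card_weaker(a[len(b):], b)
-- ===== Notes on version B (the rewrite author's own statement) =====
-- stated objective: alternative
-- what changed: B never walks or builds the concatenations a+b / b+a: it compares the overlapping prefixes for a first mismatch and, when one string is a prefix of the other, strips that prefix and recurses on the remainder (a Euclid/gcd-style descent), whereas A does one indexed pass over the two virtual concatenations.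
import Mathlib
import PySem

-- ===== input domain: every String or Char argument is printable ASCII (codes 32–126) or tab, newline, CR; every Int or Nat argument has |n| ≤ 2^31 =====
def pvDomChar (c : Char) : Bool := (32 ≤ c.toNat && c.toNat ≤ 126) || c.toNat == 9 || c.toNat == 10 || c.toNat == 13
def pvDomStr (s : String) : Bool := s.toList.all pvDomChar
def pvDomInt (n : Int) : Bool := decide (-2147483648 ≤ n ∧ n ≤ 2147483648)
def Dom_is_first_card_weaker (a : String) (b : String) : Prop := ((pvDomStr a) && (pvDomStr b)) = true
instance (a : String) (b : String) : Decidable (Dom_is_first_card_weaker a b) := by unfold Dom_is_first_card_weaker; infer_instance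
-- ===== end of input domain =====

-- B replaces A's indexed walk over the two virtual concatenations by a Euclid/gcd-style
-- descent: scan the overlap for a mismatch, else strip the common prefix and recurse
-- (alternative decomposition; same result).

-- ===== PORT A =====
-- The loop 'for i in range(0, len_f)' with its two indexed character fetches and the
-- continue / return False / return True branches, transliterated as structural recursion on i.
-- Python's a[i] / b[i - a_len] are always in range here (0 ≤ i < len_f and the guards ensure it),
-- so List.getD with an arbitrary default is exact for them.
def aLoop (la lb : List Char) (lenf i : Nat) : Option Bool :=
  if i < lenf then
    let char_ac := if i < la.length then la.getD i ' ' else lb.getD (i - la.length) ' '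
    let char_bc := if i < lb.length then lb.getD i ' ' else la.getD (i - lb.length) ' '
    if char_bc = char_ac then aLoop la lb lenf (i + 1)
    else if char_ac < char_bc then some false
    else some true
  else none
termination_by lenf - i

def is_first_card_weaker (a : String) (b : String) : Option Bool :=
  let a_len := a.toList.length
  let b_len := b.toList.length
  let len_f := if a_len = b_len then a_len else a_len + b_len
  aLoop a.toList b.toList len_f 0

-- ===== PORT B =====
-- 'for x, y in zip(a, b): if x != y: return x > y' — first mismatch of the overlap.
def zipScan : List Char → List Char → Option Bool
  | x :: xs, y :: ys => if x ≠ y then some (decide (y < x)) else zipScan xs ys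
  | _, _ => none

-- the recursive body of Source B: empty guard, overlap scan, equal-length tie, strip-and-recurse
def altRec (a b : List Char) : Option Bool :=
  if a = [] ∨ b = [] then none
  else
    match zipScan a b with
    | some r => some r
    | none =>
      if a.length = b.length then none
      else if a.length < b.length then altRec a (b.drop a.length)
      else altRec (a.drop b.length) b
termination_by a.length + b.length
decreasing_by
  · have ha : a ≠ [] := by tauto
    have := List.length_pos_iff.mpr ha
    simp [List.length_drop]; omega
  · have hb : b ≠ [] := by tauto
    have := List.length_pos_iff.mpr hb
    simp [List.length_drop]; omega

def is_first_card_weaker_alt (a : String) (b : String) : Option Bool :=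
  altRec a.toList b.toList

-- ===== PRECONDITION & SPEC =====
def Spec_is_first_card_weaker (a : String) (b : String) (out : Option Bool) : Prop := out = is_first_card_weaker_alt a b
instance (a : String) (b : String) (out : Option Bool) : Decidable (Spec_is_first_card_weaker a b out) := by unfold Spec_is_first_card_weaker; infer_instance

-- ===== CLAIM (what is proved, stated in full; the proofs are below) =====
def Claim_equal_is_first_card_weaker : Prop := ∀ (a : String) (b : String), Dom_is_first_card_weaker a b → Spec_is_first_card_weaker a b (is_first_card_weaker a b)

-- ===== LEMMAS AND PROOFS =====

-- First-difference scan of two character lists (the shared comparison kernel, index-free).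
def cmpFD : List Char → List Char → Option Bool
  | x :: xs, y :: ys =>
      if y = x then cmpFD xs ys
      else if x < y then some false
      else some true
  | _, _ => none

lemma zip_eq_cmp : ∀ (l1 l2 : List Char), zipScan l1 l2 = cmpFD l1 l2 := by
  intro l1
  induction l1 with
  | nil => intro l2; cases l2 <;> rfl
  | cons x xs ih =>
      intro l2
      cases l2 with
      | nil => rfl
      | cons y ys =>
          by_cases hxy : x = y
          · subst hxy; simp [zipScan, cmpFD, ih]
          · have hyx : ¬ y = x := fun h => hxy h.symm
            simp only [zipScan, cmpFD, if_pos hxy, if_neg hyx]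
            by_cases hlt : x < y
            · have : ¬ (y < x) := fun h => absurd (lt_trans h hlt) (lt_irrefl y)
              simp [hlt, this]
            · have : y < x := by
                rcases lt_trichotomy x y with h | h | h
                · exact absurd h hlt
                · exact absurd h hxy
                · exact h
              simp [hlt, this]

lemma aLoop_eq_cmp (la lb : List Char) (lenf : Nat)
    (hle : lenf ≤ la.length + lb.length) :
    ∀ n i, lenf - i ≤ n →
      aLoop la lb lenf i =
        cmpFD (((la ++ lb).take lenf).drop i) (((lb ++ la).take lenf).drop i) := by
  intro n
  induction n with
  | zero =>
      intro i hi
      have h : lenf ≤ i := by omega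
      rw [aLoop.eq_def]
      simp only [if_neg (by omega : ¬ i < lenf)]
      rw [List.drop_eq_nil_of_le (by simp [List.length_take]; omega),
          List.drop_eq_nil_of_le (by simp [List.length_take]; omega)]
      rfl
  | succ n ih =>
      intro i hi
      by_cases h : i < lenf
      · have h1 : i < (la ++ lb).length := by simp; omega
        have h2 : i < (lb ++ la).length := by simp; omega
        have ht1 : i < ((la ++ lb).take lenf).length := by simp [List.length_take]; omega
        have ht2 : i < ((lb ++ la).take lenf).length := by simp [List.length_take]; omega
        rw [List.drop_eq_getElem_cons ht1, List.drop_eq_getElem_cons ht2]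
        have hg1 : ((la ++ lb).take lenf)[i]'ht1 = (la ++ lb)[i]'h1 := List.getElem_take
        have hg2 : ((lb ++ la).take lenf)[i]'ht2 = (lb ++ la)[i]'h2 := List.getElem_take
        have hac : (if i < la.length then la.getD i ' ' else lb.getD (i - la.length) ' ')
            = (la ++ lb)[i]'h1 := by
          split
          · next hlt =>
              rw [List.getD_eq_getElem la ' ' hlt, List.getElem_append_left hlt]
          · next hge =>
              have hlt' : i - la.length < lb.length := by omega
              rw [List.getD_eq_getElem lb ' ' hlt', List.getElem_append_right (by omega)]
        have hbc : (if i < lb.length then lb.getD i ' ' else la.getD (i - lb.length) ' ')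
            = (lb ++ la)[i]'h2 := by
          split
          · next hlt =>
              rw [List.getD_eq_getElem lb ' ' hlt, List.getElem_append_left hlt]
          · next hge =>
              have hlt' : i - lb.length < la.length := by omega
              rw [List.getD_eq_getElem la ' ' hlt', List.getElem_append_right (by omega)]
        rw [aLoop.eq_def]
        simp only [if_pos h, hac, hbc, hg1, hg2, cmpFD]
        rw [ih (i + 1) (by omega)]
      · rw [aLoop.eq_def]
        simp only [if_neg h]
        rw [List.drop_eq_nil_of_le (by simp [List.length_take]; omega),
            List.drop_eq_nil_of_le (by simp [List.length_take]; omega)]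
        rfl

-- cmpFD of a list against itself is none.
lemma cmp_refl : ∀ (l : List Char), cmpFD l l = none := by
  intro l; induction l with
  | nil => rfl
  | cons x xs ih => simp [cmpFD, ih]

-- cmpFD xs ys = none on equal lengths forces xs = ys.
lemma cmp_none_eq : ∀ (xs ys : List Char), xs.length = ys.length →
    cmpFD xs ys = none → xs = ys := by
  intro xs
  induction xs with
  | nil =>
      intro ys hl _
      cases ys with
      | nil => rfl
      | cons y ys => simp at hl
  | cons x xs ih =>
      intro ys hl h
      cases ys with
      | nil => simp at hl
      | cons y ys =>
          simp only [List.length_cons, Nat.succ.injEq] at hl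
          by_cases hxy : y = x
          · subst hxy
            simp only [cmpFD] at h
            rw [ih ys hl h]
          · simp only [cmpFD, if_neg hxy] at h
            split at h <;> simp at h

-- a none-scan with xs no longer than ys makes xs a literal prefix of ys.
lemma cmp_none_prefix : ∀ (xs ys : List Char), xs.length ≤ ys.length →
    cmpFD xs ys = none → ys = xs ++ ys.drop xs.length := by
  intro xs
  induction xs with
  | nil => intro ys _ _; simp
  | cons x xs ih =>
      intro ys hl h
      cases ys with
      | nil => simp at hl
      | cons y ys =>
          simp only [List.length_cons] at hl
          by_cases hxy : y = x
          · subst hxy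
            simp only [cmpFD] at h
            have := ih ys (by omega) h
            simp only [List.length_cons, List.drop_succ_cons, List.cons_append]
            rw [← this]
          · simp only [cmpFD, if_neg hxy] at h
            split at h <;> simp at h

-- a decided scan is preserved by appending suffixes.
lemma cmp_some_append : ∀ (xs ys u v : List Char) (r : Bool), cmpFD xs ys = some r →
    cmpFD (xs ++ u) (ys ++ v) = some r := by
  intro xs
  induction xs with
  | nil => intro ys u v r h; cases ys <;> simp [cmpFD] at h
  | cons x xs ih =>
      intro ys u v r h
      cases ys with
      | nil => simp [cmpFD] at h
      | cons y ys =>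
          by_cases hxy : y = x
          · simp only [cmpFD, if_pos hxy] at h
            simp only [List.cons_append, cmpFD, if_pos hxy]
            exact ih ys u v r h
          · simp only [List.cons_append, cmpFD, if_neg hxy] at h ⊢
            exact h

-- cmpFD distributes over appending suffixes to equal-length prefixes.
lemma cmp_append : ∀ (xs ys u v : List Char), xs.length = ys.length →
    cmpFD (xs ++ u) (ys ++ v) =
      match cmpFD xs ys with
      | none => cmpFD u v
      | some r => some r := by
  intro xs
  induction xs with
  | nil =>
      intro ys u v hl
      cases ys with
      | nil => simp [cmpFD]
      | cons y ys => simp at hl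
  | cons x xs ih =>
      intro ys u v hl
      cases ys with
      | nil => simp at hl
      | cons y ys =>
          simp only [List.length_cons, Nat.succ.injEq] at hl
          by_cases hxy : y = x
          · simp only [List.cons_append, cmpFD, if_pos hxy, ih ys u v hl]
          · simp only [List.cons_append, cmpFD, if_neg hxy]
            split <;> rfl

-- A's whole result is cmpFD of the two concatenations, in both length cases.
lemma isA_eq_cmp (a b : String) :
    is_first_card_weaker a b = cmpFD (a.toList ++ b.toList) (b.toList ++ a.toList) := by
  unfold is_first_card_weaker
  set la := a.toList
  set lb := b.toList
  by_cases hlen : la.length = lb.length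
  · simp only [if_pos hlen]
    rw [aLoop_eq_cmp la lb la.length (by omega) la.length 0 (by omega)]
    have t1 : (la ++ lb).take la.length = la := by
      rw [List.take_append_of_le_length (le_refl _), List.take_length]
    have t2 : (lb ++ la).take la.length = lb := by
      rw [hlen, List.take_append_of_le_length (le_refl _), List.take_length]
    rw [t1, t2, List.drop_zero, List.drop_zero]
    rw [cmp_append la lb lb la hlen]
    cases hc : cmpFD la lb with
    | none =>
        have h2 := cmp_none_eq la lb hlen hc
        show none = cmpFD lb la
        rw [h2, cmp_refl]
    | some r => rfl
  · simp only [if_neg hlen]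
    rw [aLoop_eq_cmp la lb (la.length + lb.length) (le_refl _) (la.length + lb.length) 0
        (by omega)]
    have t1 : (la ++ lb).take (la.length + lb.length) = la ++ lb := by
      rw [List.take_of_length_le (by simp)]
    have t2 : (lb ++ la).take (la.length + lb.length) = lb ++ la := by
      rw [List.take_of_length_le (by simp only [List.length_append]; omega)]
    rw [t1, t2, List.drop_zero, List.drop_zero]

-- The Euclid-style descent computes exactly cmpFD of the two concatenations.
-- cmpFD-none is symmetric (it only says the overlapping prefixes agree).
lemma cmp_none_symm : ∀ (xs ys : List Char), cmpFD xs ys = none → cmpFD ys xs = none := by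
  intro xs
  induction xs with
  | nil =>
      intro ys _
      cases ys with
      | nil => rfl
      | cons y ys => rfl
  | cons x xs ih =>
      intro ys h
      cases ys with
      | nil => rfl
      | cons y ys =>
          by_cases hxy : y = x
          · subst hxy
            simp only [cmpFD] at h ⊢
            exact ih ys h
          · simp only [cmpFD, if_neg hxy] at h
            split at h <;> simp at h

-- The Euclid-style descent computes exactly cmpFD of the two concatenations.
lemma altRec_eq_cmp : ∀ n (a b : List Char), a.length + b.length ≤ n →
    altRec a b = cmpFD (a ++ b) (b ++ a) := by
  intro n
  induction n with
  | zero =>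
      intro a b h
      have ha : a = [] := List.length_eq_zero_iff.mp (by omega)
      have hb : b = [] := List.length_eq_zero_iff.mp (by omega)
      subst ha; subst hb
      rw [altRec]; simp [cmpFD]
  | succ n ih =>
      intro a b hn
      rw [altRec]
      by_cases hz : a = [] ∨ b = []
      · rw [if_pos hz]
        rcases hz with h | h <;> subst h <;> simp [cmp_refl]
      · rw [if_neg hz]
        obtain ⟨ha, hb⟩ := not_or.mp hz
        have hal := List.length_pos_iff.mpr ha
        have hbl := List.length_pos_iff.mpr hb
        rw [zip_eq_cmp]
        cases hc : cmpFD a b with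
        | some r => exact (cmp_some_append a b b a r hc).symm
        | none =>
            by_cases hlen : a.length = b.length
            · rw [if_pos hlen]
              have := cmp_none_eq a b hlen hc
              subst this
              rw [cmp_refl]
            · rw [if_neg hlen]
              by_cases hlt : a.length < b.length
              · rw [if_pos hlt]
                have hpre := cmp_none_prefix a b (by omega) hc
                set r := b.drop a.length with hr
                have step : cmpFD (a ++ b) (b ++ a) = cmpFD (a ++ r) (r ++ a) := by
                  conv_lhs => rw [hpre]
                  rw [show (a ++ r) ++ a = a ++ (r ++ a) from List.append_assoc a r a,
                      cmp_append a a (a ++ r) (r ++ a) rfl, cmp_refl]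
                rw [step, ih a r (by simp [hr]; omega)]
              · rw [if_neg hlt]
                have hble : b.length ≤ a.length := by omega
                have hcs : cmpFD b a = none := cmp_none_symm a b hc
                have hpre := cmp_none_prefix b a hble hcs
                set s := a.drop b.length with hs
                have step : cmpFD (a ++ b) (b ++ a) = cmpFD (s ++ b) (b ++ s) := by
                  conv_lhs => rw [hpre]
                  rw [show (b ++ s) ++ b = b ++ (s ++ b) from List.append_assoc b s b,
                      cmp_append b b (s ++ b) (b ++ s) rfl, cmp_refl]
                rw [step, ih s b (by simp [hs]; omega)]

-- ===== VERDICT (by name: the statement is the Claim_ definition above) =====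
theorem is_first_card_weaker_spec : Claim_equal_is_first_card_weaker := by
  intro a b _
  unfold Spec_is_first_card_weaker is_first_card_weaker_alt
  rw [isA_eq_cmp a b,
      altRec_eq_cmp (a.toList.length + b.toList.length) a.toList b.toList (le_refl _)]
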